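-- pv_equiv track=rewrite | github.com/sspedowski1/DASHBOARD-BILLING | src/scrubber/ov_to_billing.py | _pick_em_code
-- ===== SOURCE A (Python) =====
-- E_M_BY_TIME = [
--     (40, "99215"),
--     (30, "99214"),
--     (20, "99213"),
--     (10, "99212"),
-- ]
--
-- MDM_TO_EM = {
--     "straightforward":"99212",
--     "low":"99213",
--     "moderate":"99214",
--     "high":"99215",
-- }
--
-- def _pick_em_code(time_minutes:int|None, mdm_level:str|None) -> str|None:
--     if time_minutes and time_minutes >= 10:
--         for threshold, code in E_M_BY_TIME:
--             if time_minutes >= threshold: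
--                 return code
--     if mdm_level:
--         return MDM_TO_EM.get(mdm_level.lower())
--     return None
-- ===== SOURCE B (Python) =====
-- MDM_TO_EM = {
--     "straightforward":"99212",
--     "low":"99213",
--     "moderate":"99214",
--     "high":"99215",
-- }
--
-- def _pick_em_code(time_minutes, mdm_level):
--     if time_minutes and time_minutes >= 10:
--         return str(99212 + min((time_minutes - 10) // 10, 3))
--     if mdm_level:
--         return MDM_TO_EM.get(mdm_level.lower())
--     return None
-- ===== Notes on version B (the rewrite author's own statement) =====
-- stated objective: simpler
-- what changed: Replaces the descending scan over the E_M_BY_TIME threshold table with a closed-form bucket formula str(99212 + min((time_minutes - 10) // 10, 3)); the MDM fallback stays a dict lookup.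
import Mathlib
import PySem

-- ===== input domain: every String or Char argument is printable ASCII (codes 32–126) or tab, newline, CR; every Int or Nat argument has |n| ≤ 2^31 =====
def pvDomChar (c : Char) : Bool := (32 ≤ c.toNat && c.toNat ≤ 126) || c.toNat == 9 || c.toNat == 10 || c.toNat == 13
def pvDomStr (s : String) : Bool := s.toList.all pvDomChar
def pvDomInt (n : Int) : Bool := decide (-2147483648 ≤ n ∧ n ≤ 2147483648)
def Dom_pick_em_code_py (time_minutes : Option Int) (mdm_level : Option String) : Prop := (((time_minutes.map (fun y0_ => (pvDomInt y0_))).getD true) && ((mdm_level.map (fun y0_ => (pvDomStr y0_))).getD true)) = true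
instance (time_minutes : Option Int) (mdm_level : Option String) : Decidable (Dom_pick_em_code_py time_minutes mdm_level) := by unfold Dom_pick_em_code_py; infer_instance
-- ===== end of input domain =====

-- ===== PORT A =====
-- B replaces the 4-entry threshold scan by a closed-form bucket formula (objective: simpler).
def emByTime : List (Int × String) := [(40, "99215"), (30, "99214"), (20, "99213"), (10, "99212")]

def mdmToEm : PySem.Dict String String :=
  PySem.Dict.ofList [("straightforward", "99212"), ("low", "99213"), ("moderate", "99214"), ("high", "99215")]

-- the 'for threshold, code in E_M_BY_TIME: if time_minutes >= threshold: return code' loop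
def pickLoop (tv : Int) : List (Int × String) → Option String
  | [] => none
  | (th, c) :: rest => if tv ≥ th then some c else pickLoop tv rest

def pick_em_code_py (time_minutes : Option Int) (mdm_level : Option String) : Option String :=
  let fromTime : Option String :=
    match time_minutes with
    | some tv => if tv ≠ 0 ∧ tv ≥ 10 then pickLoop tv emByTime else none
    | none => none
  match fromTime with
  | some c => some c
  | none =>
    match mdm_level with
    | some s => if s ≠ "" then PySem.Dict.get? mdmToEm (PySem.Str.lower s) else none
    | none => none

-- ===== PORT B =====
def pick_em_code_py_alt (time_minutes : Option Int) (mdm_level : Option String) : Option String :=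
  match time_minutes with
  | some tv =>
    if tv ≠ 0 ∧ tv ≥ 10 then
      some (PySem.Int.toStr (99212 + min (PySem.Int.floordiv (tv - 10) 10) 3))
    else
      match mdm_level with
      | some s => if s ≠ "" then PySem.Dict.get? mdmToEm (PySem.Str.lower s) else none
      | none => none
  | none =>
    match mdm_level with
    | some s => if s ≠ "" then PySem.Dict.get? mdmToEm (PySem.Str.lower s) else none
    | none => none

-- ===== PRECONDITION & SPEC =====
def Spec_pick_em_code_py (time_minutes : Option Int) (mdm_level : Option String) (out : Option String) : Prop := out = pick_em_code_py_alt time_minutes mdm_level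
instance (time_minutes : Option Int) (mdm_level : Option String) (out : Option String) : Decidable (Spec_pick_em_code_py time_minutes mdm_level out) := by unfold Spec_pick_em_code_py; infer_instance

-- ===== CLAIM (what is proved, stated in full; the proofs are below) =====
def Claim_equal_pick_em_code_py : Prop := ∀ (time_minutes : Option Int) (mdm_level : Option String), Dom_pick_em_code_py time_minutes mdm_level → Spec_pick_em_code_py time_minutes mdm_level (pick_em_code_py time_minutes mdm_level)

-- ===== LEMMAS AND PROOFS =====

-- ===== VERDICT (by name: the statement is the Claim_ definition above) =====
-- For tv ≥ 10 the loop result equals the closed-form bucket.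
lemma loop_eq_formula (tv : Int) (h : tv ≥ 10) :
    pickLoop tv emByTime = some (PySem.Int.toStr (99212 + min (PySem.Int.floordiv (tv - 10) 10) 3)) := by
  have hd : PySem.Int.floordiv (tv - 10) 10 = (tv - 10) / 10 :=
    PySem.Int.floordiv_eq_ediv_of_pos (by omega)
  by_cases h40 : 40 ≤ tv
  · have hm : min (PySem.Int.floordiv (tv - 10) 10) 3 = 3 := by rw [hd]; omega
    rw [hm]
    simp only [pickLoop, emByTime, if_pos h40]
    decide
  by_cases h30 : 30 ≤ tv
  · have hm : min (PySem.Int.floordiv (tv - 10) 10) 3 = 2 := by rw [hd]; omega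
    rw [hm]
    simp only [pickLoop, emByTime, if_neg h40, if_pos h30]
    decide
  by_cases h20 : 20 ≤ tv
  · have hm : min (PySem.Int.floordiv (tv - 10) 10) 3 = 1 := by rw [hd]; omega
    rw [hm]
    simp only [pickLoop, emByTime, if_neg h40, if_neg h30, if_pos h20]
    decide
  · have hm : min (PySem.Int.floordiv (tv - 10) 10) 3 = 0 := by rw [hd]; omega
    rw [hm]
    simp only [pickLoop, emByTime, if_neg h40, if_neg h30, if_neg h20, if_pos h]
    decide

theorem pick_em_code_py_spec : Claim_equal_pick_em_code_py := by
  intro t m _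
  unfold Spec_pick_em_code_py pick_em_code_py pick_em_code_py_alt
  cases t with
  | none => simp
  | some tv =>
    by_cases h : tv ≠ 0 ∧ tv ≥ 10
    · simp only [if_pos h, loop_eq_formula tv h.2]
    · simp [h]
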